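-- pv_equiv track=rewrite | github.com/Yang-Hyeon-Seo/algorithm | algo_study/16504_gravity/16504_gravity.py | selection_sort_drop_count
-- ===== SOURCE A (Python) =====
-- import copy
--
-- def selection_sort_drop_count(arr, N):
--     """
--     선택정렬
--
--     새로운 리스트 만들어서
--     새로운 리스트의 뒤에서부터 가장 큰 값(가장 뒤에 있는)부터 넣는데
--     기존 리스트의 인덱스에서 얼마나 이동하게 되었는지를 max_num과 비교해서
--     만약 max_drop보다 크면 max_drop 갱신하고, 아니면 그냥 날리기
--
--     :param arr: 정렬할 리스트
--     :param N: 리스트의 길이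
--     :return: 정렬된 리스트
--     """
--
--     sorted_arr = copy.copy(arr)  # 중첩 리스트가 아니니까 그냥 copy하면 됨
--     # sorted_arr = arr[:]  # 이것도 동일함
--     max_drop = 0  # drop
--     for i in range(N-1, 0, -1):  # 뒤에서부터 돌면서 체크
--         max_idx = i
--         for j in range(1, i):
--             if arr[j] >= arr[max_idx]:
--                 max_idx = j
--         drop = i - max_idx
--         if max_drop < drop:
--             max_drop = drop
--
--
--     return max_drop
-- ===== SOURCE B (Python) =====
-- def selection_sort_drop_count(arr, N):
--     """Single left-to-right pass: track the max of arr[1..i-1] and the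
--     rightmost index holding it; the drop at i is i - that index when the
--     prefix max >= arr[i]. O(N) instead of A's O(N^2)."""
--     max_drop = 0
--     have = False
--     pm = 0  # prefix max value over indices 1..i-1
--     pj = 0  # rightmost index of pm
--     for i in range(1, N):
--         v = arr[i]
--         if have and pm >= v:
--             if i - pj > max_drop:
--                 max_drop = i - pj
--         if not have or v >= pm:
--             have = True
--             pm = v
--             pj = i
--     return max_drop
-- ===== Notes on version B (the rewrite author's own statement) =====
-- stated objective: faster
-- what changed: Replaces the O(N^2) nested rescans (for each i, an inner scan recomputing the last argmax of arr[1..i-1]) by a single left-to-right pass that maintains the running prefix maximum and the rightmost index holding it, from which each drop is read off in O(1); Pre_ also excludes N=2 with fewer than 2 elements, where A happens to return 0 without ever touching the list while B's scan raises IndexError.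
-- outside the precondition, e.g. on selection_sort_drop_count([-36], 2): A returns 0, B raises IndexError
import Mathlib
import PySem

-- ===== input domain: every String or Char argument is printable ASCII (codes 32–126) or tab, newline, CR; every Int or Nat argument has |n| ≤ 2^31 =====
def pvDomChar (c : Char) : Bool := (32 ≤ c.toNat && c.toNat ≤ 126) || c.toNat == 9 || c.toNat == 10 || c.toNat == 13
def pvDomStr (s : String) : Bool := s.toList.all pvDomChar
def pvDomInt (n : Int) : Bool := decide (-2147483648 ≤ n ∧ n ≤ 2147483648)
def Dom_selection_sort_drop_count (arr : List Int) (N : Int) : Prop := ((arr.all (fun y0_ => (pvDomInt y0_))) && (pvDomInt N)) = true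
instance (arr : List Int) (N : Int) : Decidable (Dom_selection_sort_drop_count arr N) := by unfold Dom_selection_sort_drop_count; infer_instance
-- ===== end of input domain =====

-- B replaces A's nested rescans (for each i an inner scan recomputing the last
-- argmax of arr[1..i-1]) by one left-to-right pass tracking the prefix maximum
-- over indices 1..i-1 and the rightmost index holding it.
-- Neither version mutates arr (A copies it and never uses the copy).

-- ===== PORT A =====
def selection_sort_drop_count (arr : List Int) (N : Int) : Int :=
  let _sorted_arr := arr  -- copy.copy(arr); built but never used afterwards
  (PySem.List.pyRange (N - 1) 0 (-1)).foldl
    (fun max_drop i =>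
      let max_idx :=
        (PySem.List.pyRange 1 i 1).foldl
          (fun max_idx j =>
            if PySem.List.pyGetD arr j 0 ≥ PySem.List.pyGetD arr max_idx 0 then j else max_idx)
          i
      let drop := i - max_idx
      if max_drop < drop then drop else max_drop)
    0

-- ===== PORT B =====
def selection_sort_drop_count_alt (arr : List Int) (N : Int) : Int :=
  ((PySem.List.pyRange 1 N 1).foldl
    (fun (s : Int × Bool × Int × Int) i =>
      let max_drop := s.1
      let have_ := s.2.1
      let pm := s.2.2.1
      let pj := s.2.2.2
      let v := PySem.List.pyGetD arr i 0
      let max_drop := if have_ = true ∧ pm ≥ v then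
                        (if i - pj > max_drop then i - pj else max_drop)
                      else max_drop
      if have_ = false ∨ v ≥ pm then (max_drop, true, v, i) else (max_drop, have_, pm, pj))
    (0, false, 0, 0)).1

-- ===== PRECONDITION & SPEC =====
-- Pre_ excludes the inputs on which the Python A raises IndexError (N ≥ 3 and
-- N > len(arr)) and the degenerate corner N = 2 with len(arr) < 2, where A
-- returns 0 without ever reading the list while B's index scan raises.
def Pre_selection_sort_drop_count (arr : List Int) (N : Int) : Prop :=
  N ≤ (arr.length : Int) ∨ N ≤ 1
instance (arr : List Int) (N : Int) : Decidable (Pre_selection_sort_drop_count arr N) := by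
  unfold Pre_selection_sort_drop_count; infer_instance

def pvWitness_selection_sort_drop_count : List Int × Int := ([3, 1, 2], 3)

def Spec_selection_sort_drop_count (arr : List Int) (N : Int) (out : Int) : Prop := out = selection_sort_drop_count_alt arr N
instance (arr : List Int) (N : Int) (out : Int) : Decidable (Spec_selection_sort_drop_count arr N out) := by unfold Spec_selection_sort_drop_count; infer_instance

-- ===== CLAIM (what is proved, stated in full; the proofs are below) =====
def Claim_equal_selection_sort_drop_count : Prop := ∀ (arr : List Int) (N : Int), Dom_selection_sort_drop_count arr N → Pre_selection_sort_drop_count arr N → Spec_selection_sort_drop_count arr N (selection_sort_drop_count arr N)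

-- ===== LEMMAS AND PROOFS =====

-- the step of A's inner argmax scan
def pvAstep (g : Int → Int) (mi j : Int) : Int := if g j ≥ g mi then j else mi
-- the prefix-state step of B: (seen-anything, prefix max, rightmost argmax)
def pvPstep (g : Int → Int) (t : Bool × Int × Int) (i : Int) : Bool × Int × Int :=
  if t.1 = false ∨ g i ≥ t.2.1 then (true, g i, i) else t
-- B's full step and fold
def pvBstep (g : Int → Int) (s : Int × Bool × Int × Int) (i : Int) : Int × Bool × Int × Int :=
  let md := if s.2.1 = true ∧ s.2.2.1 ≥ g i then
              (if i - s.2.2.2 > s.1 then i - s.2.2.2 else s.1)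
            else s.1
  if s.2.1 = false ∨ g i ≥ s.2.2.1 then (md, true, g i, i) else (md, s.2.1, s.2.2.1, s.2.2.2)
def pvBfold (g : Int → Int) (L : List Int) : Int × Bool × Int × Int :=
  L.foldl (pvBstep g) (0, false, 0, 0)
def pvPfold (g : Int → Int) (L : List Int) : Bool × Int × Int :=
  L.foldl (pvPstep g) (false, 0, 0)
-- A's fold over the (forward) outer index list
def pvAfold (g : Int → Int) (L : List Int) : Int :=
  L.foldl
    (fun md i =>
      let mi := (PySem.List.pyRange 1 i 1).foldl (pvAstep g) i
      if md < i - mi then i - mi else md)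
    0

theorem pvBstep_fst (g : Int → Int) (s : Int × Bool × Int × Int) (i : Int) :
    (pvBstep g s i).1 = (if s.2.1 = true ∧ s.2.2.1 ≥ g i then
        (if i - s.2.2.2 > s.1 then i - s.2.2.2 else s.1) else s.1) := by
  unfold pvBstep; split_ifs <;> rfl

theorem pvBstep_snd (g : Int → Int) (s : Int × Bool × Int × Int) (i : Int) :
    (pvBstep g s i).2 = pvPstep g s.2 i := by
  unfold pvBstep pvPstep; split_ifs <;> rfl

-- A's inner argmax scan over an index list L, started at s, equals the value
-- read off from B's prefix state (have, pm, pj) folded over the same L.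
theorem pv_inner (g : Int → Int) :
    ∀ (L : List Int) (s : Int) (h : Bool) (pm pj : Int), (h = true → g pj = pm) →
      L.foldl (pvAstep g) (if h = true ∧ pm ≥ g s then pj else s)
      = (if (L.foldl (pvPstep g) (h, pm, pj)).1 = true
            ∧ (L.foldl (pvPstep g) (h, pm, pj)).2.1 ≥ g s
         then (L.foldl (pvPstep g) (h, pm, pj)).2.2 else s) := by
  intro L
  induction L with
  | nil => intro s h pm pj hinv; simp
  | cons j L ih =>
    intro s h pm pj hinv
    simp only [List.foldl_cons]
    cases h with
    | false =>
      have hp : pvPstep g (false, pm, pj) j = (true, g j, j) := by simp [pvPstep]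
      have ha : pvAstep g (if (false = true ∧ pm ≥ g s) then pj else s) j
          = (if ((true : Bool) = true ∧ g j ≥ g s) then j else s) := by
        simp only [pvAstep, true_and, Bool.false_eq_true, false_and, if_false]
      rw [ha, hp]
      exact ih s true (g j) j (by simp)
    | true =>
      have hg := hinv rfl
      by_cases hj : g j ≥ pm
      · have hp : pvPstep g (true, pm, pj) j = (true, g j, j) := by simp [pvPstep, hj]
        have ha : pvAstep g (if (true = true ∧ pm ≥ g s) then pj else s) j
            = (if ((true : Bool) = true ∧ g j ≥ g s) then j else s) := by
          simp only [pvAstep, true_and]; split_ifs <;> omega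
        rw [ha, hp]
        exact ih s true (g j) j (by simp)
      · have hp : pvPstep g (true, pm, pj) j = (true, pm, pj) := by simp [pvPstep, hj]
        have ha : pvAstep g (if (true = true ∧ pm ≥ g s) then pj else s) j
            = (if ((true : Bool) = true ∧ pm ≥ g s) then pj else s) := by
          simp only [pvAstep, true_and]; split_ifs <;> omega
        rw [ha, hp]
        exact ih s true pm pj hinv

-- max-folds: pull one step through the fold …
theorem pv_pull (d : Int → Int) :
    ∀ (L : List Int) (b a : Int),
      L.foldl (fun acc i => if acc < d i then d i else acc) (if b < d a then d a else b)
      = (if L.foldl (fun acc i => if acc < d i then d i else acc) b < d a then d a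
         else L.foldl (fun acc i => if acc < d i then d i else acc) b) := by
  intro L
  induction L with
  | nil => intro b a; simp
  | cons c L ih =>
    intro b a
    simp only [List.foldl_cons]
    rw [show (if (if b < d a then d a else b) < d c then d c else (if b < d a then d a else b))
          = (if (if b < d c then d c else b) < d a then d a else (if b < d c then d c else b)) by
        split_ifs <;> omega]
    exact ih (if b < d c then d c else b) a

-- … hence they ignore list reversal
theorem pv_rev (d : Int → Int) :
    ∀ (L : List Int) (b : Int),
      L.reverse.foldl (fun acc i => if acc < d i then d i else acc) b
      = L.foldl (fun acc i => if acc < d i then d i else acc) b := by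
  intro L
  induction L with
  | nil => intro b; simp
  | cons a L ih =>
    intro b
    simp only [List.reverse_cons, List.foldl_append, List.foldl_cons, List.foldl_nil, ih]
    exact (pv_pull d L b a).symm

-- Main invariant, by induction on the length of the forward range 1..N-1.
theorem pv_main (g : Int → Int) : ∀ (m : Nat),
    pvAfold g (PySem.List.pyRange 1 (1 + (m : Int)) 1)
      = (pvBfold g (PySem.List.pyRange 1 (1 + (m : Int)) 1)).1
    ∧ 0 ≤ (pvBfold g (PySem.List.pyRange 1 (1 + (m : Int)) 1)).1
    ∧ (pvBfold g (PySem.List.pyRange 1 (1 + (m : Int)) 1)).2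
        = pvPfold g (PySem.List.pyRange 1 (1 + (m : Int)) 1)
    ∧ ((pvPfold g (PySem.List.pyRange 1 (1 + (m : Int)) 1)).1 = true →
        g (pvPfold g (PySem.List.pyRange 1 (1 + (m : Int)) 1)).2.2
          = (pvPfold g (PySem.List.pyRange 1 (1 + (m : Int)) 1)).2.1) := by
  intro m
  induction m with
  | zero =>
    have h0 : PySem.List.pyRange 1 (1 + ((0 : Nat) : Int)) 1 = [] :=
      PySem.List.pyRange_one_eq_nil (by norm_num)
    rw [h0]
    simp [pvAfold, pvBfold, pvPfold]
  | succ m ih =>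
    obtain ⟨ihA, ihNN, ihB, ihP⟩ := ih
    have hsplit : PySem.List.pyRange 1 (1 + ((m + 1 : Nat) : Int)) 1
        = PySem.List.pyRange 1 (1 + (m : Int)) 1 ++ [1 + (m : Int)] := by
      have h1 := PySem.List.pyRange_one_succ_right (a := 1) (b := 1 + (m : Int)) (by omega)
      rw [show (1 : Int) + ((m + 1 : Nat) : Int) = (1 + (m : Int)) + 1 by push_cast; ring]
      exact h1
    rw [hsplit]
    set L := PySem.List.pyRange 1 (1 + (m : Int)) 1 with hL
    set i : Int := 1 + (m : Int) with hi
    have eA : pvAfold g (L ++ [i])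
        = (if pvAfold g L < i - (PySem.List.pyRange 1 i 1).foldl (pvAstep g) i
           then i - (PySem.List.pyRange 1 i 1).foldl (pvAstep g) i else pvAfold g L) := by
      simp only [pvAfold, List.foldl_append, List.foldl_cons, List.foldl_nil]
    have eB : pvBfold g (L ++ [i]) = pvBstep g (pvBfold g L) i := by
      simp only [pvBfold, List.foldl_append, List.foldl_cons, List.foldl_nil]
    have eP : pvPfold g (L ++ [i]) = pvPstep g (pvPfold g L) i := by
      simp only [pvPfold, List.foldl_append, List.foldl_cons, List.foldl_nil]
    have hrange : PySem.List.pyRange 1 i 1 = L := by rw [hL, hi]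
    have hinner : (PySem.List.pyRange 1 i 1).foldl (pvAstep g) i
        = (if (pvPfold g L).1 = true ∧ (pvPfold g L).2.1 ≥ g i then (pvPfold g L).2.2 else i) := by
      rw [hrange]
      have h := pv_inner g L i false 0 0 (by simp)
      simpa [pvPfold] using h
    set p := pvPfold g L with hp
    refine ⟨?_, ?_, ?_, ?_⟩
    · rw [eA, eB, hinner, ihA, pvBstep_fst, ihB]
      by_cases hc : p.1 = true ∧ p.2.1 ≥ g i
      · rw [if_pos hc, if_pos hc]
      · rw [if_neg hc, if_neg hc]
        split_ifs <;> omega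
    · rw [eB, pvBstep_fst, ihB]
      by_cases hc : p.1 = true ∧ p.2.1 ≥ g i
      · rw [if_pos hc]; split_ifs <;> omega
      · rw [if_neg hc]; omega
    · rw [eB, eP, pvBstep_snd, ihB]
    · rw [eP]
      unfold pvPstep
      split_ifs with hc
      · simp
      · intro ht; exact ihP ht

-- ===== VERDICT (by name: the statement is the Claim_ definition above) =====
theorem selection_sort_drop_count_spec : Claim_equal_selection_sort_drop_count := by
  intro arr N _hdom _hpre
  unfold Spec_selection_sort_drop_count
  have hA : selection_sort_drop_count arr N
      = pvAfold (fun j => PySem.List.pyGetD arr j 0) (PySem.List.pyRange (N - 1) 0 (-1)) := rfl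
  have hB : selection_sort_drop_count_alt arr N
      = (pvBfold (fun j => PySem.List.pyGetD arr j 0) (PySem.List.pyRange 1 N 1)).1 := rfl
  rw [hA, hB]
  set g : Int → Int := fun j => PySem.List.pyGetD arr j 0 with hg
  by_cases hN : N ≤ 1
  · rw [PySem.List.pyRange_neg_one_eq_nil (by omega : N - 1 ≤ 0),
        PySem.List.pyRange_one_eq_nil (by omega : N ≤ 1)]
    simp [pvAfold, pvBfold]
  · have hrev : PySem.List.pyRange (N - 1) 0 (-1) = (PySem.List.pyRange 1 N 1).reverse := by
      have h := PySem.List.pyRange_neg_one_eq_reverse (N - 1) 0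
      rw [show (0 : Int) + 1 = 1 by norm_num, show N - 1 + 1 = N by ring] at h
      exact h
    have hArev : pvAfold g ((PySem.List.pyRange 1 N 1).reverse)
        = pvAfold g (PySem.List.pyRange 1 N 1) := by
      simpa [pvAfold] using
        pv_rev (fun i => i - (PySem.List.pyRange 1 i 1).foldl (pvAstep g) i)
          (PySem.List.pyRange 1 N 1) 0
    have hNm : (1 : Int) + (((N - 1).toNat : Nat) : Int) = N := by omega
    have hmain := (pv_main g (N - 1).toNat).1
    rw [hNm] at hmain
    rw [hrev, hArev, hmain]
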